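-- pv_equiv track=rewrite | github.com/DataCovey/nornweave | src/nornweave/verdandi/content.py | _basic_quote_removal
-- ===== SOURCE A (Python) =====
-- def _basic_quote_removal(text: str) -> str:
--     """
--     Basic quote removal without Talon.
--
--     Removes lines starting with > and common "On ... wrote:" patterns.
--     """
--     if not text:
--         return ""
--
--     lines = text.split("\n")
--     result_lines = []
--     in_quote = False
--
--     for line in lines:
--         # Check for "On ... wrote:" pattern
--         if _is_quote_header(line):
--             in_quote = True
--             continue
--
--         # Check for > quoted lines
--         stripped = line.strip()
--         if stripped.startswith(">"):
--             in_quote = True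
--             continue
--
--         # Check for "-----Original Message-----"
--         if "-----Original Message-----" in line:
--             in_quote = True
--             continue
--
--         if not in_quote:
--             result_lines.append(line)
--         elif stripped and not stripped.startswith(">"):
--             # Non-empty, non-quoted line after quote section
--             # This might be a signature or footer, keep for now
--             result_lines.append(line)
--
--     return "\n".join(result_lines).strip()
--
-- def _is_quote_header(line: str) -> bool:
--     """Check if line is a quote header like 'On Jan 31, 2026, Bob wrote:'."""
--     line_lower = line.lower().strip()
--
--     # Gmail style: "On Mon, Jan 31, 2026 at 10:00 AM Bob wrote:"
--     if line_lower.startswith("on ") and "wrote:" in line_lower: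
--         return True
--
--     # Outlook style (beginning of separator)
--     return bool(line.strip().startswith("From:") or line.strip().startswith("Sent:"))
-- ===== SOURCE B (Python) =====
-- def _is_trigger(line: str) -> bool:
--     """A line that switches the original loop into quote mode."""
--     low = line.lower().strip()
--     s = line.strip()
--     return ((low.startswith("on ") and "wrote:" in low)
--             or s.startswith("From:") or s.startswith("Sent:")
--             or s.startswith(">")
--             or "-----Original Message-----" in line)
--
--
-- def _basic_quote_removal(text: str) -> str:
--     if not text:
--         return ""
--     lines = text.split("\n")
--     k = next((i for i, l in enumerate(lines) if _is_trigger(l)), None)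
--     if k is None:
--         kept = lines
--     else:
--         # before the first trigger: keep verbatim; after it: keep only
--         # non-empty, non-trigger lines
--         kept = lines[:k] + [l for l in lines[k + 1:]
--                             if l.strip() and not _is_trigger(l)]
--     return "\n".join(kept).strip()
-- ===== Notes on version B (the rewrite author's own statement) =====
-- stated objective: alternative
-- what changed: Replaces the stateful in_quote flag loop with a boundary split: since in_quote only ever flips to True, B finds the index of the first trigger line, keeps everything before it verbatim, and filters the lines after it for non-empty non-trigger lines.
import Mathlib
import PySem

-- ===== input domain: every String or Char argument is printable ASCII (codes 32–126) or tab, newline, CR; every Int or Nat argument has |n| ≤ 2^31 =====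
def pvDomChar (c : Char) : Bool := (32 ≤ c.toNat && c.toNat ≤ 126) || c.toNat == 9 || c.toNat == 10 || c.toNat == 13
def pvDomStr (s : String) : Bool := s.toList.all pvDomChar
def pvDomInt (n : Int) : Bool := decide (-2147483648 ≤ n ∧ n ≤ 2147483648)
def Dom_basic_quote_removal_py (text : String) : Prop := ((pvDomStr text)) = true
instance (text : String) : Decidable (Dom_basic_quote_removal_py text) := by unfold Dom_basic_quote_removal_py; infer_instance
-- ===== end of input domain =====

-- B replaces A's stateful in_quote flag with a split at the first trigger line (alternative decomposition, same cost).

-- ===== PORT A =====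
def is_quote_header_py (line : String) : Bool :=
  let line_lower := PySem.Str.strip (PySem.Str.lower line)
  if PySem.Str.startswith line_lower "on " && PySem.Str.isIn "wrote:" line_lower then
    true
  else
    PySem.Str.startswith (PySem.Str.strip line) "From:" ||
      PySem.Str.startswith (PySem.Str.strip line) "Sent:"

def stepA (st : List String × Bool) (line : String) : List String × Bool :=
  if is_quote_header_py line then (st.1, true)
  else
    let stripped := PySem.Str.strip line
    if PySem.Str.startswith stripped ">" then (st.1, true)
    else if PySem.Str.isIn "-----Original Message-----" line then (st.1, true)
    else if !st.2 then (st.1 ++ [line], st.2)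
    else if stripped != "" && !PySem.Str.startswith stripped ">" then (st.1 ++ [line], st.2)
    else st

def basic_quote_removal_py (text : String) : String :=
  if text == "" then ""
  else
    -- text.split("\n"): split? is `some` here since the separator is non-empty
    let lines := (PySem.Str.split? text "\n").getD []
    let st := lines.foldl stepA ([], false)
    PySem.Str.strip (PySem.Str.join "\n" st.1)

-- ===== PORT B =====
def is_trigger_alt (line : String) : Bool :=
  let low := PySem.Str.strip (PySem.Str.lower line)
  let s := PySem.Str.strip line
  (PySem.Str.startswith low "on " && PySem.Str.isIn "wrote:" low) ||
    PySem.Str.startswith s "From:" || PySem.Str.startswith s "Sent:" ||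
    PySem.Str.startswith s ">" ||
    PySem.Str.isIn "-----Original Message-----" line

def basic_quote_removal_py_alt (text : String) : String :=
  if text == "" then ""
  else
    -- text.split("\n"): split? is `some` here since the separator is non-empty
    let lines := (PySem.Str.split? text "\n").getD []
    let kept :=
      match lines.findIdx? is_trigger_alt with
      | none => lines
      | some k =>
          lines.take k ++
            (lines.drop (k + 1)).filter
              (fun l => PySem.Str.strip l != "" && !is_trigger_alt l)
    PySem.Str.strip (PySem.Str.join "\n" kept)

-- ===== PRECONDITION & SPEC =====
def Spec_basic_quote_removal_py (text : String) (out : String) : Prop := out = basic_quote_removal_py_alt text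
instance (text : String) (out : String) : Decidable (Spec_basic_quote_removal_py text out) := by unfold Spec_basic_quote_removal_py; infer_instance

-- ===== CLAIM (what is proved, stated in full; the proofs are below) =====
def Claim_equal_basic_quote_removal_py : Prop := ∀ (text : String), Dom_basic_quote_removal_py text → Spec_basic_quote_removal_py text (basic_quote_removal_py text)

-- ===== LEMMAS AND PROOFS =====

def keepA (l : String) : Bool := PySem.Str.strip l != "" && !is_trigger_alt l

lemma stepA_eq (acc : List String) (b : Bool) (l : String) :
    stepA (acc, b) l =
      if is_trigger_alt l then (acc, true)
      else if b then
        (if PySem.Str.strip l != "" then (acc ++ [l], true) else (acc, true))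
      else (acc ++ [l], false) := by
  simp only [stepA, is_trigger_alt, is_quote_header_py]
  by_cases hq : (PySem.Str.startswith (PySem.Str.strip (PySem.Str.lower l)) "on " &&
      PySem.Str.isIn "wrote:" (PySem.Str.strip (PySem.Str.lower l))) = true <;>
  by_cases hf : PySem.Str.startswith (PySem.Str.strip l) "From:" = true <;>
  by_cases hs : PySem.Str.startswith (PySem.Str.strip l) "Sent:" = true <;>
  by_cases hg : PySem.Str.startswith (PySem.Str.strip l) ">" = true <;>
  by_cases hm : PySem.Str.isIn "-----Original Message-----" l = true <;>
  cases b <;>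
  simp only [hq, hf, hs, hg, hm, Bool.not_eq_true] at * <;>
  simp

lemma loopT (lines : List String) (acc : List String) :
    List.foldl stepA (acc, true) lines = (acc ++ lines.filter keepA, true) := by
  induction lines generalizing acc with
  | nil => simp
  | cons l rest ih =>
    rw [List.foldl_cons, stepA_eq]
    by_cases h : is_trigger_alt l = true
    · simp [h, ih, keepA]
    · by_cases h4 : PySem.Str.strip l = ""
      · simp [h, h4, ih, keepA]
      · simp [h, h4, ih, keepA]

lemma loopF (lines : List String) (acc : List String) :
    (List.foldl stepA (acc, false) lines).1 =
      acc ++ (match lines.findIdx? is_trigger_alt with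
        | none => lines
        | some k => lines.take k ++ (lines.drop (k + 1)).filter keepA) := by
  induction lines generalizing acc with
  | nil => simp
  | cons l rest ih =>
    rw [List.foldl_cons, stepA_eq, List.findIdx?_cons]
    by_cases h : is_trigger_alt l = true
    · simp [h, loopT]
    · rw [if_neg (by simp [h]), if_neg (by simp), ih]
      simp only [h, Bool.false_eq_true, ↓reduceIte]
      cases hf : rest.findIdx? is_trigger_alt with
      | none => simp
      | some k => simp [List.take_succ_cons]

lemma kept_eq (lines : List String) :
    (List.foldl stepA ([], false) lines).1 =
      (match lines.findIdx? is_trigger_alt with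
        | none => lines
        | some k => lines.take k ++ (lines.drop (k + 1)).filter
            (fun l => PySem.Str.strip l != "" && !is_trigger_alt l)) := by
  have := loopF lines []
  simpa [keepA] using this

-- ===== VERDICT (by name: the statement is the Claim_ definition above) =====
theorem basic_quote_removal_py_spec : Claim_equal_basic_quote_removal_py := by
  intro text _
  unfold Spec_basic_quote_removal_py basic_quote_removal_py basic_quote_removal_py_alt
  by_cases h : text == ""
  · simp [h]
  · simp only [h, Bool.false_eq_true, ↓reduceIte]
    rw [kept_eq]
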